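-- pv_equiv track=rewrite | github.com/ltgoslo/finegrained_modelling | Utils/classification_data_utils.py | add_span_tags_to_text
-- ===== SOURCE A (Python) =====
-- def add_span_tags_to_text(tokens, labels):
--     new_sent = []
--     for i, (tok, label) in enumerate(zip(tokens, labels)):
--         if "B-targ" in label:
--             new_sent.append("[<<TARG]")
--             new_sent.append(tok)
--             if i+1 < len(labels):
--                 if "I-targ" not in labels[i+1]:
--                     new_sent.append("[TARG>>]")
--             else:
--                 new_sent.append("[TARG>>]")
--         elif "I-targ" in label:
--             new_sent.append(tok)
--             if i+1 < len(labels):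
--                 if "I-targ" not in labels[i+1]:
--                     new_sent.append("[TARG>>]")
--             else:
--                 new_sent.append("[TARG>>]")
--         elif "B-holder" in label:
--             new_sent.append("[<<HOLDER]")
--             new_sent.append(tok)
--             if i+1 < len(labels):
--                 if "I-holder" not in labels[i+1]:
--                     new_sent.append("[HOLDER>>]")
--             else:
--                 new_sent.append("[HOLDER>>]")
--         elif "I-holder" in label:
--             new_sent.append(tok)
--             if i+1 < len(labels):
--                 if "I-holder" not in labels[i+1]:
--                     new_sent.append("[HOLDER>>]")
--             else:
--                 new_sent.append("[HOLDER>>]")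
--         elif "B-exp" in label:
--             new_sent.append("[<<EXP]")
--             new_sent.append(tok)
--             if i+1 < len(labels):
--                 if "I-exp" not in labels[i+1]:
--                     new_sent.append("[EXP>>]")
--             else:
--                 new_sent.append("[EXP>>]")
--         elif "I-exp" in label:
--             new_sent.append(tok)
--             if i+1 < len(labels):
--                 if "I-exp" not in labels[i+1]:
--                     new_sent.append("[EXP>>]")
--             else:
--                 new_sent.append("[EXP>>]")
--         else:
--             new_sent.append(tok)
--     return " ".join(new_sent)
-- ===== SOURCE B (Python) =====
-- TAG_INFO = [("B-targ", "I-targ", "[<<TARG]", "[TARG>>]"),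
--             ("B-holder", "I-holder", "[<<HOLDER]", "[HOLDER>>]"),
--             ("B-exp", "I-exp", "[<<EXP]", "[EXP>>]")]
--
--
-- def _span_type(label):
--     for kind in TAG_INFO:
--         if kind[0] in label or kind[1] in label:
--             return kind
--     return None
--
--
-- def add_span_tags_to_text(tokens, labels):
--     out = []
--     n = min(len(tokens), len(labels))
--     i = 0
--     while i < n:
--         kind = _span_type(labels[i])
--         if kind is None:
--             out.append(tokens[i])
--             i += 1
--             continue
--         btag, itag, opener, closer = kind
--         # consume a whole span of this kind
--         while True:
--             if btag in labels[i]: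
--                 out.append(opener)
--             out.append(tokens[i])
--             i += 1
--             if i < n and itag in labels[i] and _span_type(labels[i]) == kind:
--                 continue
--             break
--         if i >= len(labels) or itag not in labels[i]:
--             out.append(closer)
--     return " ".join(out)
-- ===== Notes on version B (the rewrite author's own statement) =====
-- stated objective: alternative
-- what changed: Replaces A's six-way copy-pasted elif chain (one branch per tag marker, each re-testing the lookahead label) with a span-consuming loop driven by a single tag table: the first matching kind is looked up once, then an inner loop emits the whole span and the close tag once at its end.
import Mathlib
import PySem

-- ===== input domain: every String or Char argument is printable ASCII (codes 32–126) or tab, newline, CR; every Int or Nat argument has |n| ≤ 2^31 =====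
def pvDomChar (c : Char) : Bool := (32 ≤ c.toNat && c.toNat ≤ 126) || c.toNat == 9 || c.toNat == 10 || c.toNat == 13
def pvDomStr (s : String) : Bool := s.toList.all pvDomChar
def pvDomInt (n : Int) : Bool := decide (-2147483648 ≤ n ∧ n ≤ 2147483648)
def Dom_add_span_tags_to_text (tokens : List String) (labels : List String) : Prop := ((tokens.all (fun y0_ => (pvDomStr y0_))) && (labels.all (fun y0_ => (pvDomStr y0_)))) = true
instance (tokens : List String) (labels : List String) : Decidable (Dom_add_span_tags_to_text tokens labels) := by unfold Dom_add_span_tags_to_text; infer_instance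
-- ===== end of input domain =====

-- B rewrites A's six-branch per-token loop as a span-consuming loop over a tag table
-- (objective: alternative decomposition, same cost); the return value is proved equal.

-- ===== PORT A =====
-- the conditional close-tag append of A ("if i+1 < len(labels): if itag not in labels[i+1]: append; else: append")
def pvCloseA (itag cl : String) (nls : List String) : List String :=
  match nls.head? with
  | some l => if PySem.Str.isIn itag l then [] else [cl]
  | none => [cl]

-- A's for-loop over enumerate(zip(tokens, labels)); `nls` is labels[i+1:], so
-- labels[i+1] is nls.head? and the next iteration's lookahead list is nls.tail.
def pvGoA : List (String × String) → List String → List String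
  | [], _ => []
  | (tok, label) :: rest, nls =>
    if PySem.Str.isIn "B-targ" label then
      "[<<TARG]" :: tok :: (pvCloseA "I-targ" "[TARG>>]" nls ++ pvGoA rest nls.tail)
    else if PySem.Str.isIn "I-targ" label then
      tok :: (pvCloseA "I-targ" "[TARG>>]" nls ++ pvGoA rest nls.tail)
    else if PySem.Str.isIn "B-holder" label then
      "[<<HOLDER]" :: tok :: (pvCloseA "I-holder" "[HOLDER>>]" nls ++ pvGoA rest nls.tail)
    else if PySem.Str.isIn "I-holder" label then
      tok :: (pvCloseA "I-holder" "[HOLDER>>]" nls ++ pvGoA rest nls.tail)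
    else if PySem.Str.isIn "B-exp" label then
      "[<<EXP]" :: tok :: (pvCloseA "I-exp" "[EXP>>]" nls ++ pvGoA rest nls.tail)
    else if PySem.Str.isIn "I-exp" label then
      tok :: (pvCloseA "I-exp" "[EXP>>]" nls ++ pvGoA rest nls.tail)
    else
      tok :: pvGoA rest nls.tail

def add_span_tags_to_text (tokens : List String) (labels : List String) : String :=
  PySem.Str.join " " (pvGoA (tokens.zip labels) labels.tail)

-- ===== PORT B =====
-- TAG_INFO: (btag, itag, opener, closer)
def pvKinds : List (String × String × String × String) :=
  [("B-targ", "I-targ", "[<<TARG]", "[TARG>>]"),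
   ("B-holder", "I-holder", "[<<HOLDER]", "[HOLDER>>]"),
   ("B-exp", "I-exp", "[<<EXP]", "[EXP>>]")]

-- _span_type: first kind whose B- or I- marker occurs in the label
def pvSpanType (label : String) : Option (String × String × String × String) :=
  pvKinds.find? (fun k => PySem.Str.isIn k.1 label || PySem.Str.isIn k.2.1 label)

-- B's close test "i >= len(labels) or itag not in labels[i]" on the remaining labels
def pvCloseB (itag : String) (nls : List String) : Bool :=
  match nls.head? with
  | some l => !PySem.Str.isIn itag l
  | none => true

-- B's while-loop: pvGoB handles the outer loop (pairs = remaining zipped tokens,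
-- nls = labels after the current token's label); pvSpanB is the inner span-consuming
-- loop (pairs = pairs after the just-emitted token, nls = labels after its label).
mutual
def pvGoB : List (String × String) → List String → List String
  | [], _ => []
  | (tok, label) :: rest, nls =>
    match pvSpanType label with
    | none => tok :: pvGoB rest nls.tail
    | some k =>
      (if PySem.Str.isIn k.1 label then [k.2.2.1] else []) ++ tok :: pvSpanB k rest nls
termination_by pairs _ => 2 * pairs.length
decreasing_by all_goals (simp only [List.length_cons]; omega)

def pvSpanB (k : String × String × String × String) :
    List (String × String) → List String → List String
  | [], nls => if pvCloseB k.2.1 nls then [k.2.2.2] else []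
  | (tok, label) :: rest, nls =>
    if PySem.Str.isIn k.2.1 label && (pvSpanType label == some k) then
      (if PySem.Str.isIn k.1 label then [k.2.2.1] else []) ++ tok :: pvSpanB k rest nls.tail
    else
      (if pvCloseB k.2.1 nls then [k.2.2.2] else []) ++ pvGoB ((tok, label) :: rest) nls.tail
termination_by pairs _ => 2 * pairs.length + 1
decreasing_by all_goals (simp only [List.length_cons]; omega)
end

def add_span_tags_to_text_alt (tokens : List String) (labels : List String) : String :=
  PySem.Str.join " " (pvGoB (tokens.zip labels) labels.tail)

-- ===== PRECONDITION & SPEC =====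
def Spec_add_span_tags_to_text (tokens : List String) (labels : List String) (out : String) : Prop := out = add_span_tags_to_text_alt tokens labels
instance (tokens : List String) (labels : List String) (out : String) : Decidable (Spec_add_span_tags_to_text tokens labels out) := by unfold Spec_add_span_tags_to_text; infer_instance

-- ===== CLAIM (what is proved, stated in full; the proofs are below) =====
def Claim_equal_add_span_tags_to_text : Prop := ∀ (tokens : List String) (labels : List String), Dom_add_span_tags_to_text tokens labels → Spec_add_span_tags_to_text tokens labels (add_span_tags_to_text tokens labels)

-- ===== LEMMAS AND PROOFS =====

theorem pvCloseA_eq (itag cl : String) (nls : List String) :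
    pvCloseA itag cl nls = if pvCloseB itag nls then [cl] else [] := by
  cases nls with
  | nil => simp [pvCloseA, pvCloseB]
  | cons l ls =>
    simp only [pvCloseA, pvCloseB, List.head?]
    by_cases h : PySem.Str.isIn itag l = true <;> simp_all

-- A's six-way elif chain, re-expressed through B's span-type table.
theorem pvGoA_eq (tok label : String) (rest : List (String × String)) (nls : List String) :
    pvGoA ((tok, label) :: rest) nls =
      match pvSpanType label with
      | none => tok :: pvGoA rest nls.tail
      | some k =>
          (if PySem.Str.isIn k.1 label then [k.2.2.1] else []) ++
            tok :: ((if pvCloseB k.2.1 nls then [k.2.2.2] else []) ++ pvGoA rest nls.tail) := by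
  simp only [pvGoA, pvSpanType, pvKinds, List.find?, pvCloseA_eq]
  by_cases h1 : PySem.Str.isIn "B-targ" label = true <;>
  by_cases h2 : PySem.Str.isIn "I-targ" label = true <;>
  by_cases h3 : PySem.Str.isIn "B-holder" label = true <;>
  by_cases h4 : PySem.Str.isIn "I-holder" label = true <;>
  by_cases h5 : PySem.Str.isIn "B-exp" label = true <;>
  by_cases h6 : PySem.Str.isIn "I-exp" label = true <;>
    simp_all

theorem pv_main (toks : List String) : ∀ ls : List String,
    (pvGoA (toks.zip ls) ls.tail = pvGoB (toks.zip ls) ls.tail) ∧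
    (∀ k, pvSpanB k (toks.zip ls) ls =
      (if pvCloseB k.2.1 ls then [k.2.2.2] else []) ++ pvGoA (toks.zip ls) ls.tail) := by
  induction toks with
  | nil =>
    intro ls
    refine ⟨by simp only [List.zip_nil_left]; rw [pvGoB, pvGoA], fun k => ?_⟩
    simp only [List.zip_nil_left]
    rw [pvSpanB, pvGoA]
    simp
  | cons a toks' ih =>
    intro ls
    cases ls with
    | nil =>
      refine ⟨by simp only [List.zip_nil_right]; rw [pvGoB, pvGoA], fun k => ?_⟩
      simp only [List.zip_nil_right]
      rw [pvSpanB, pvGoA]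
      simp [pvCloseB]
    | cons l ls' =>
      have hP : pvGoA ((a, l) :: toks'.zip ls') ls'
              = pvGoB ((a, l) :: toks'.zip ls') ls' := by
        rw [pvGoA_eq, pvGoB]
        cases hst : pvSpanType l with
        | none => simp [(ih ls').1]
        | some k =>
          simp only [(ih ls').2 k]
      refine ⟨by simpa using hP, fun k => ?_⟩
      simp only [List.zip_cons_cons, List.tail_cons]
      rw [pvSpanB]
      by_cases hc : (PySem.Str.isIn k.2.1 l && (pvSpanType l == some k)) = true
      · obtain ⟨h1, h2⟩ : PySem.Str.isIn k.2.1 l = true ∧ pvSpanType l = some k := by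
          simpa [Bool.and_eq_true] using hc
        rw [if_pos hc]
        simp only [List.tail_cons]
        have h1' : PySem.Chars.isIn k.2.1.toList l.toList = true := by
          simpa [PySem.Str.isIn] using h1
        rw [(ih ls').2 k, pvGoA_eq, h2]
        simp [pvCloseB, h1']
      · rw [if_neg hc]
        simp only [List.tail_cons]
        rw [hP]

-- ===== VERDICT (by name: the statement is the Claim_ definition above) =====
theorem add_span_tags_to_text_spec : Claim_equal_add_span_tags_to_text := by
  intro tokens labels _
  unfold Spec_add_span_tags_to_text add_span_tags_to_text add_span_tags_to_text_alt
  rw [(pv_main tokens labels).1]
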